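-- pv_equiv track=rewrite | github.com/sacmad21/whatsAgency | campaign/actions/creatives/write_promotional_messaging.py | parse_promotional_message_variant
-- ===== SOURCE A (Python) =====
-- def parse_promotional_message_variant(block: str) -> dict:
--     """
--     Parse LLM output expecting:
--     WhatsApp Message: ...
--     Instagram Message: ...
--     Facebook Message: ...
--     """
--     parsed = {}
--     lines = block.strip().split("\n")
--     current_platform = None
--
--     for line in lines:
--         if "WhatsApp Message:" in line:
--             current_platform = "WhatsApp"
--             parsed[current_platform] = {"message": line.split(":", 1)[1].strip(), "cta": ""}
--         elif "Instagram Message:" in line: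
--             current_platform = "Instagram"
--             parsed[current_platform] = {"message": line.split(":", 1)[1].strip(), "cta": ""}
--         elif "Facebook Message:" in line:
--             current_platform = "Facebook"
--             parsed[current_platform] = {"message": line.split(":", 1)[1].strip(), "cta": ""}
--         elif "Call to Action:" in line and current_platform:
--             parsed[current_platform]["cta"] = line.split(":", 1)[1].strip()
--
--     return parsed
-- ===== SOURCE B (Python) =====
-- _MARKERS = [
--     ("WhatsApp Message:", "WhatsApp"),
--     ("Instagram Message:", "Instagram"),
--     ("Facebook Message:", "Facebook"),
-- ]
--
--
-- def _platform(line):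
--     for marker, name in _MARKERS:
--         if marker in line:
--             return name
--     return None
--
--
-- def _after_colon(line):
--     return line.split(":", 1)[1].strip()
--
--
-- def _segments(lines, result):
--     while lines:
--         head, rest = lines[0], lines[1:]
--         name = _platform(head)
--         if name is None:
--             lines = rest
--             continue
--         body = []
--         for ln in rest:
--             if _platform(ln) is not None:
--                 break
--             body.append(ln)
--         cta = ""
--         for ln in body:
--             if "Call to Action:" in ln:
--                 cta = _after_colon(ln)
--         result[name] = {"message": _after_colon(head), "cta": cta}
--         lines = rest[len(body):]
--     return result
--
--
-- def parse_promotional_message_variant(block: str) -> dict: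
--     return _segments(block.strip().split("\n"), {})
-- ===== Notes on version B (the rewrite author's own statement) =====
-- stated objective: alternative
-- what changed: Replaces A's single-pass state machine (mutable current_platform plus in-place cta mutation of the dict entry) by a table-driven recursive segmentation: lines are split into segments at platform-marker lines, each segment's last CTA is computed locally, and each segment yields one complete dict entry.
import Mathlib
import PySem

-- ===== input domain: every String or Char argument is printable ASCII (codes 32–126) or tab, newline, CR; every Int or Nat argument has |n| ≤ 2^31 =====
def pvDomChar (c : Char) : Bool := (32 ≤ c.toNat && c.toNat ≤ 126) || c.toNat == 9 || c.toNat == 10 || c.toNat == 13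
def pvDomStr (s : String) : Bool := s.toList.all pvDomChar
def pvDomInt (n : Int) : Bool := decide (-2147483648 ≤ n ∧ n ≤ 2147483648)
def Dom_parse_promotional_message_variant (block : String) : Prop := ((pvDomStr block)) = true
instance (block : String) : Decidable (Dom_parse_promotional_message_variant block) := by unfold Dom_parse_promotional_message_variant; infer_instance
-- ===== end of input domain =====

-- B replaces A's single-pass state machine (current_platform + in-place cta mutation) by a
-- table-driven recursive segmentation of the lines at platform-marker lines (objective: alternative).

-- ===== PORT A =====
-- A's repeated expression line.split(":", 1)[1].strip(); the index [1] always exists when this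
-- is evaluated (the matched marker / "Call to Action:" guarantees a ':' in the line).
def pvTailA (line : String) : String :=
  PySem.Str.strip (((PySem.Str.splitMax? line ":" 1).getD []).getD 1 "")

-- one iteration of A's for-loop over (parsed, current_platform)
def pvStepA (st : PySem.Dict String (PySem.Dict String String) × Option String) (line : String) :
    PySem.Dict String (PySem.Dict String String) × Option String :=
  if PySem.Str.isIn "WhatsApp Message:" line then
    (st.1.insert "WhatsApp" (PySem.Dict.ofList [("message", pvTailA line), ("cta", "")]), some "WhatsApp")
  else if PySem.Str.isIn "Instagram Message:" line then
    (st.1.insert "Instagram" (PySem.Dict.ofList [("message", pvTailA line), ("cta", "")]), some "Instagram")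
  else if PySem.Str.isIn "Facebook Message:" line then
    (st.1.insert "Facebook" (PySem.Dict.ofList [("message", pvTailA line), ("cta", "")]), some "Facebook")
  else
    match st.2 with
    | some p =>
        if PySem.Str.isIn "Call to Action:" line then
          (st.1.modify p PySem.Dict.empty (fun inner => inner.insert "cta" (pvTailA line)), st.2)
        else st
    | none => st

def parse_promotional_message_variant (block : String) : List (String × List (String × String)) :=
  let lines := ((PySem.Str.split? (PySem.Str.strip block) "\n").getD [])
  ((lines.foldl pvStepA (PySem.Dict.empty, none)).1.items.map (fun kv => (kv.1, kv.2.items)))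

-- ===== PORT B =====
def pvMarkersB : List (String × String) :=
  [("WhatsApp Message:", "WhatsApp"), ("Instagram Message:", "Instagram"), ("Facebook Message:", "Facebook")]

-- _platform: first marker contained in the line, else None
def pvPlatformB (line : String) : Option String :=
  (pvMarkersB.find? (fun mn => PySem.Str.isIn mn.1 line)).map (·.2)

-- _after_colon
def pvTailB (line : String) : String :=
  PySem.Str.strip (((PySem.Str.splitMax? line ":" 1).getD []).getD 1 "")

-- _segments: recursive segmentation of the remaining lines
def pvSegB (lines : List String) (result : PySem.Dict String (PySem.Dict String String)) :
    PySem.Dict String (PySem.Dict String String) :=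
  match lines with
  | [] => result
  | head :: rest =>
    match pvPlatformB head with
    | none => pvSegB rest result
    | some name =>
      let body := rest.takeWhile (fun ln => (pvPlatformB ln).isNone)
      let cta := body.foldl (fun c ln => if PySem.Str.isIn "Call to Action:" ln then pvTailB ln else c) ""
      pvSegB (rest.drop body.length)
        (result.insert name (PySem.Dict.ofList [("message", pvTailB head), ("cta", cta)]))
  termination_by lines.length
  decreasing_by
    all_goals simp only [List.length_drop, List.length_cons]
    all_goals omega

def parse_promotional_message_variant_alt (block : String) : List (String × List (String × String)) :=
  (pvSegB (((PySem.Str.split? (PySem.Str.strip block) "\n").getD [])) PySem.Dict.empty).items.map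
    (fun kv => (kv.1, kv.2.items))

-- ===== PRECONDITION & SPEC =====
def Spec_parse_promotional_message_variant (block : String) (out : List (String × List (String × String))) : Prop := out = parse_promotional_message_variant_alt block
instance (block : String) (out : List (String × List (String × String))) : Decidable (Spec_parse_promotional_message_variant block out) := by unfold Spec_parse_promotional_message_variant; infer_instance

-- ===== CLAIM (what is proved, stated in full; the proofs are below) =====
def Claim_equal_parse_promotional_message_variant : Prop := ∀ (block : String), Dom_parse_promotional_message_variant block → Spec_parse_promotional_message_variant block (parse_promotional_message_variant block)

-- ===== LEMMAS AND PROOFS =====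

-- the two ports' "text after the first colon" helpers coincide
theorem pvTail_eq : pvTailB = pvTailA := rfl

-- a line with no marker: all three containment tests of A are false
theorem pvPlatform_none {l : String} (h : pvPlatformB l = none) :
    PySem.Str.isIn "WhatsApp Message:" l = false ∧ PySem.Str.isIn "Instagram Message:" l = false ∧
      PySem.Str.isIn "Facebook Message:" l = false := by
  simp [pvPlatformB, pvMarkersB, List.find?_eq_none] at h
  refine ⟨?_, ?_, ?_⟩ <;> simp_all

-- A's step on a marker-free line with no current platform is a no-op
theorem stepA_skip {l : String} (h : pvPlatformB l = none) (d) :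
    pvStepA (d, none) l = (d, none) := by
  obtain ⟨h1, h2, h3⟩ := pvPlatform_none h
  simp only [pvStepA, h1, h2, h3, Bool.false_eq_true, if_false]

-- A's step on a marker line: insert a fresh entry and set the current platform (independently of the old one)
theorem stepA_marker {l : String} {name : String} (h : pvPlatformB l = some name) (d cur) :
    pvStepA (d, cur) l
      = (d.insert name (PySem.Dict.ofList [("message", pvTailA l), ("cta", "")]), some name) := by
  cases h1 : PySem.Str.isIn "WhatsApp Message:" l <;>
    cases h2 : PySem.Str.isIn "Instagram Message:" l <;>
      cases h3 : PySem.Str.isIn "Facebook Message:" l <;>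
        simp_all [pvPlatformB, pvMarkersB, pvStepA]

-- the inner-dict mutation entry["cta"] = v
theorem insert_cta (m c v : String) :
    (PySem.Dict.ofList [("message", m), ("cta", c)]).insert "cta" v
      = PySem.Dict.ofList [("message", m), ("cta", v)] := by
  simp [PySem.Dict.ofList, PySem.Dict.insert, PySem.Dict.contains, PySem.Dict.empty, PySem.Dict.update]

-- modifying the entry just inserted at p rewrites it in place
theorem modify_insert (d : PySem.Dict String (PySem.Dict String String)) (p X f) :
    (d.insert p X).modify p PySem.Dict.empty f = d.insert p (f X) := by
  show (d.insert p X).insert p (f ((d.insert p X).getD p PySem.Dict.empty)) = d.insert p (f X)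
  rw [PySem.Dict.getD_insert_self, PySem.Dict.insert_insert_self]

-- A's step on a marker-free line while a current entry is the latest insert at p
theorem stepA_nonmarker {l : String} (h : pvPlatformB l = none)
    (d : PySem.Dict String (PySem.Dict String String)) (p m c : String) :
    pvStepA (d.insert p (PySem.Dict.ofList [("message", m), ("cta", c)]), some p) l
      = (d.insert p (PySem.Dict.ofList [("message", m),
          ("cta", if PySem.Str.isIn "Call to Action:" l then pvTailA l else c)]), some p) := by
  obtain ⟨h1, h2, h3⟩ := pvPlatform_none h
  simp only [pvStepA, h1, h2, h3, Bool.false_eq_true, if_false]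
  cases h4 : PySem.Str.isIn "Call to Action:" l with
  | true => simp only [if_true, modify_insert, insert_cta]
  | false => simp only [Bool.false_eq_true, if_false]

-- processing a marker-free segment only rewrites the cta of the current entry
theorem foldA_segment (seg : List String) (h : ∀ l ∈ seg, pvPlatformB l = none)
    (rem : List String) (d : PySem.Dict String (PySem.Dict String String)) (p m c : String) :
    (seg ++ rem).foldl pvStepA (d.insert p (PySem.Dict.ofList [("message", m), ("cta", c)]), some p)
      = rem.foldl pvStepA
          (d.insert p (PySem.Dict.ofList [("message", m),
            ("cta", seg.foldl (fun acc ln => if PySem.Str.isIn "Call to Action:" ln then pvTailB ln else acc) c)]), some p) := by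
  induction seg generalizing c with
  | nil => rfl
  | cons l t ih =>
    have ht : ∀ x ∈ t, pvPlatformB x = none := fun x hx => h x (List.mem_cons_of_mem _ hx)
    rw [List.cons_append, List.foldl_cons, stepA_nonmarker (h l List.mem_cons_self) d p m c,
      List.foldl_cons]
    exact ih ht _

-- the list left by dropWhile is empty or starts with a line failing the predicate
theorem dropWhile_head (q : String → Bool) (l : List String) :
    l.dropWhile q = [] ∨ ∃ x t, l.dropWhile q = x :: t ∧ q x = false := by
  induction l with
  | nil => exact Or.inl rfl
  | cons x t ih =>
    by_cases h : q x
    · simpa [h] using ih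
    · exact Or.inr ⟨x, t, by simp [h], by simp [h]⟩

theorem drop_takeWhile_length (q : String → Bool) (l : List String) :
    l.drop (l.takeWhile q).length = l.dropWhile q := by
  induction l with
  | nil => rfl
  | cons x t ih => by_cases h : q x <;> simp [h, ih]

-- the main invariant: A's fold from (d, cur) equals B's segmentation from d whenever
-- cur is none or the remaining lines start with a marker line (or are empty)
theorem foldA_eq_segB : ∀ (n : Nat) (lines : List String)
    (d : PySem.Dict String (PySem.Dict String String)) (cur : Option String),
    lines.length ≤ n →
    (cur = none ∨ lines = [] ∨ ∃ l t, lines = l :: t ∧ (pvPlatformB l).isSome) →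
    (lines.foldl pvStepA (d, cur)).1 = pvSegB lines d := by
  intro n
  induction n with
  | zero =>
    intro lines d cur hlen _
    have : lines = [] := List.length_eq_zero_iff.mp (Nat.le_zero.mp hlen)
    subst this
    simp [pvSegB]
  | succ n ih =>
    intro lines d cur hlen hcur
    match lines with
    | [] => simp [pvSegB]
    | l :: rest =>
      cases hpl : pvPlatformB l with
      | none =>
        -- head is not a marker line; by hcur the current platform must be none
        have hcn : cur = none := by
          rcases hcur with h | h | ⟨x, t, hx, hs⟩
          · exact h
          · simp at h
          · injection hx with hx1 hx2
            subst hx1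
            rw [hpl] at hs
            simp at hs
        subst hcn
        rw [List.foldl_cons, stepA_skip hpl d]
        have := ih rest d none (by simpa using Nat.lt_succ_iff.mp (Nat.lt_of_lt_of_le (by simp) hlen)) (Or.inl rfl)
        rw [this]
        simp [pvSegB, hpl]
      | some name =>
        rw [List.foldl_cons, stepA_marker hpl d cur]
        have hsplit : rest = rest.takeWhile (fun ln => (pvPlatformB ln).isNone)
            ++ rest.dropWhile (fun ln => (pvPlatformB ln).isNone) :=
          (List.takeWhile_append_dropWhile ..).symm
        set body := rest.takeWhile (fun ln => (pvPlatformB ln).isNone) with hbody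
        set rem := rest.dropWhile (fun ln => (pvPlatformB ln).isNone) with hrem
        have hbodyNone : ∀ x ∈ body, pvPlatformB x = none := by
          intro x hx
          have := List.mem_takeWhile_imp hx
          simpa [Option.isNone_iff_eq_none] using this
        conv_lhs => rw [hsplit]
        rw [foldA_segment body hbodyNone rem d name (pvTailA l) "" ]
        have hremlen : rem.length ≤ n := by
          have h1 : rem.length ≤ rest.length := by
            rw [hrem]; exact List.length_dropWhile_le _ _
          have h2 : rest.length ≤ n := by simpa using Nat.lt_succ_iff.mp (Nat.lt_of_lt_of_le (by simp) hlen)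
          omega
        have hremshape : rem = [] ∨ ∃ x t, rem = x :: t ∧ (pvPlatformB x).isSome := by
          rcases dropWhile_head (fun ln => (pvPlatformB ln).isNone) rest with h | ⟨x, t, hxt, hq⟩
          · exact Or.inl (by rw [hrem]; exact h)
          · refine Or.inr ⟨x, t, by rw [hrem]; exact hxt, ?_⟩
            simpa [Option.isNone_iff_eq_none, Option.isSome_iff_ne_none] using hq
        -- the state's current platform is irrelevant here: rem is empty or starts with a marker
        have hdrop : rest.drop body.length = rem := by
          rw [hbody, hrem]; exact drop_takeWhile_length _ _
        have key := ih rem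
          (d.insert name (PySem.Dict.ofList [("message", pvTailA l),
            ("cta", body.foldl (fun acc ln => if PySem.Str.isIn "Call to Action:" ln then pvTailB ln else acc) "")]))
          (some name) hremlen
        have hcurOk : (some name : Option String) = none ∨ rem = [] ∨ ∃ x t, rem = x :: t ∧ (pvPlatformB x).isSome := by
          rcases hremshape with h | h
          · exact Or.inr (Or.inl h)
          · exact Or.inr (Or.inr h)
        rw [key hcurOk]
        conv_rhs => rw [pvSegB]
        simp only [hpl, ← hbody, ← pvTail_eq, hdrop]

-- ===== VERDICT (by name: the statement is the Claim_ definition above) =====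
theorem parse_promotional_message_variant_spec : Claim_equal_parse_promotional_message_variant := by
  intro block _
  unfold Spec_parse_promotional_message_variant parse_promotional_message_variant parse_promotional_message_variant_alt
  have := foldA_eq_segB (((PySem.Str.split? (PySem.Str.strip block) "\n").getD [])).length
    (((PySem.Str.split? (PySem.Str.strip block) "\n").getD [])) PySem.Dict.empty none le_rfl (Or.inl rfl)
  exact congrArg (fun d => d.items.map (fun kv => (kv.1, kv.2.items))) this
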